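-- pv_equiv track=rewrite | github.com/Viciooo/WDI_zestawy | Zestaw_4.py | ex12
-- ===== SOURCE A (Python) =====
-- def IfComplex(n): #sprawdza czy złożona
--     if n <=1:
--         return 0
--     if n ==2 or n ==3:
--         return 0
--     if n %2==0 or n%3==0:
--         return 1
--     i = 6
--     while (i-1)**2<=n:
--         if n %(i-1) == 0:
--             return 1
--         if n%(i+1) == 0:
--             return 1
--         i+=6
--     return 0
--
-- def ex12(t):
-- #Zadanie 12. Dana jest tablica T[N][N][N]. Prosze napisac funkcje, do której przekazujemy tablice wypełniona
-- #liczbami wiekszymi od zera. Funkcja powinna zwracac wartosc True, jezeli na wszystkich poziomach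
-- #tablicy liczba elementów sasiadujacych (w obrebia poziomu) z co najmniej 6 liczbami złozonymi jest jednakowa
-- #albo wartosc False w przeciwnym przypadku.
--     N = len(t)
--     tab = [0]*N
--     for p in range(N):
--         for r in range(N):
--             for c in range(N):
--                 cnt = 0
--                 if r > 0:
--                     cnt += IfComplex(t[p][r-1][c])
--                 if r < N-1:
--                     cnt += IfComplex(t[p][r+1][c])
--                 if c > 0 and r > 0:
--                     cnt += IfComplex(t[p][r-1][c-1])
--                 if c > 0 and r < N-1:
--                     cnt += IfComplex(t[p][r+1][c-1])
--                 if c < N-1 and r > 0: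
--                     cnt += IfComplex(t[p][r-1][c+1])
--                 if c < N-1 and r < N-1:
--                     cnt += IfComplex(t[p][r+1][c+1])
--                 if cnt >= 6:
--                     tab[p] += 1
--         if p != 0 and tab[p] != tab[p-1]:
--             return False
--
--     return True
-- ===== SOURCE B (Python) =====
-- def IfComplex(n):  # same composite test as the module's helper
--     if n <= 1:
--         return 0
--     if n == 2 or n == 3:
--         return 0
--     if n % 2 == 0 or n % 3 == 0:
--         return 1
--     i = 6
--     while (i - 1) ** 2 <= n:
--         if n % (i - 1) == 0:
--             return 1
--         if n % (i + 1) == 0: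
--             return 1
--         i += 6
--     return 0
--
-- def ex12(t):
--     # A cell counts iff its neighbour count is >= 6; it has at most 6 neighbours
--     # (the six cells in the rows above and below), so it counts exactly when it is
--     # interior and ALL six of those cells are composite.  Equivalently: the 3-cell
--     # window centred at its column is all-composite in the row above AND below.
--     N = len(t)
--     counts = []
--     for level in t:
--         comp = [[IfComplex(x) == 1 for x in row] for row in level]
--         # win[r][c]: columns c-1..c+1 of row r are all composite (c interior)
--         win = [[1 <= c <= N - 2 and comp[r][c - 1] and comp[r][c] and comp[r][c + 1]
--                 for c in range(N)] for r in range(N)]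
--         cnt = sum(1 for r in range(1, N - 1) for c in range(1, N - 1)
--                   if win[r - 1][c] and win[r + 1][c])
--         counts.append(cnt)
--     return all(x == counts[0] for x in counts)
-- ===== Notes on version B (the rewrite author's own statement) =====
-- stated objective: alternative
-- what changed: B replaces A's per-cell summation of six guarded neighbour primality calls by a logical characterization: cnt>=6 can only mean ALL six neighbours exist and are composite, so B builds a per-row 3-column all-composite window table and counts interior cells whose rows above and below both satisfy the window, collecting per-level counts and comparing them at the end instead of A's tab array with an early return.
import Mathlib
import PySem

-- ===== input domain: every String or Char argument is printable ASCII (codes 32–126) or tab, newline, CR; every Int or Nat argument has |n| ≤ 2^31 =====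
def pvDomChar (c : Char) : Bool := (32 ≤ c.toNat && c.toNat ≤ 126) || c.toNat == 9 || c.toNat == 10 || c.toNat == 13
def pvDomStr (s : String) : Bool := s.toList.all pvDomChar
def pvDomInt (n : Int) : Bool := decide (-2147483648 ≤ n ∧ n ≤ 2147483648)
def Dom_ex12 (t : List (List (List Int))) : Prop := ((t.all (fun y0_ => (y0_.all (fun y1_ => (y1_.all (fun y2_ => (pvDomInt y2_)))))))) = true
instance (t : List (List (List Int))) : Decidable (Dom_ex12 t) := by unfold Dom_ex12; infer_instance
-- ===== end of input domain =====

-- B replaces the per-cell sum of six guarded composite tests by the observation that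
-- cnt >= 6 forces all six neighbours to exist and be composite, counting interior cells
-- whose adjacent rows both carry an all-composite 3-column window; same return value on Pre_.

-- ===== PORT A =====
-- while (i-1)**2 <= n loop of IfComplex, with fuel n.toNat+1 (always sufficient: the
-- loop runs at most ~sqrt(n)/6 iterations, so the fuel never runs out on entry n ≥ 5)
def ifComplexAux (n : Int) : Nat → Int → Int
  | 0, _ => 0
  | fuel + 1, i =>
    if (i - 1) ^ 2 ≤ n then
      if PySem.Int.mod n (i - 1) = 0 then 1
      else if PySem.Int.mod n (i + 1) = 0 then 1
      else ifComplexAux n fuel (i + 6)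
    else 0

def ifComplex (n : Int) : Int :=
  if n ≤ 1 then 0
  else if n = 2 ∨ n = 3 then 0
  else if PySem.Int.mod n 2 = 0 ∨ PySem.Int.mod n 3 = 0 then 1
  else ifComplexAux n (n.toNat + 1) 6

-- A's per-cell neighbour count `cnt` (the six guarded additions, kept as a helper)
def cntA (lvl : List (List Int)) (N : Nat) (r c : Nat) : Int :=
  (if r > 0 then ifComplex ((lvl.getD (r-1) []).getD c 0) else 0)
  + (if r < N-1 then ifComplex ((lvl.getD (r+1) []).getD c 0) else 0)
  + (if c > 0 ∧ r > 0 then ifComplex ((lvl.getD (r-1) []).getD (c-1) 0) else 0)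
  + (if c > 0 ∧ r < N-1 then ifComplex ((lvl.getD (r+1) []).getD (c-1) 0) else 0)
  + (if c < N-1 ∧ r > 0 then ifComplex ((lvl.getD (r-1) []).getD (c+1) 0) else 0)
  + (if c < N-1 ∧ r < N-1 then ifComplex ((lvl.getD (r+1) []).getD (c+1) 0) else 0)

-- the two inner loops over r and c for one level (acc = tab[p])
def ex12Level (lvl : List (List Int)) (N : Nat) (acc : Int) : Int :=
  (List.range N).foldl (fun acc r =>
    (List.range N).foldl (fun acc c =>
      let cnt := cntA lvl N r c
      if cnt ≥ 6 then acc + 1 else acc) acc) acc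

-- the outer loop over p, with tab and the early `return False`
def ex12Go (t : List (List (List Int))) (N : Nat) : List Nat → List Int → Bool
  | [], _ => true
  | p :: ps, tab =>
    let tab' := tab.set p (ex12Level (t.getD p []) N (tab.getD p 0))
    if p ≠ 0 ∧ tab'.getD p 0 ≠ tab'.getD (p-1) 0 then false
    else ex12Go t N ps tab'

def ex12 (t : List (List (List Int))) : Bool :=
  let N := t.length
  ex12Go t N (List.range N) (List.replicate N 0)

-- ===== PORT B =====
-- per level: composite table, per-row 3-column all-composite window table,
-- then count interior cells whose rows above and below both satisfy the window
def ex12AltLevel (N : Nat) (lvl : List (List Int)) : Int :=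
  let comp := lvl.map (fun row => row.map (fun x => ifComplex x == 1))
  let win := (List.range N).map (fun r => (List.range N).map (fun c =>
    decide (1 ≤ c ∧ c ≤ N - 2) && (comp.getD r []).getD (c - 1) false
      && (comp.getD r []).getD c false && (comp.getD r []).getD (c + 1) false))
  (List.range' 1 (N - 1 - 1)).foldl (fun (cnt : Int) r =>
    (List.range' 1 (N - 1 - 1)).foldl (fun cnt c =>
      if (win.getD (r - 1) []).getD c false && (win.getD (r + 1) []).getD c false then cnt + 1
      else cnt) cnt) 0

def ex12_alt (t : List (List (List Int))) : Bool :=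
  let N := t.length
  let counts := t.map (ex12AltLevel N)
  counts.all (fun x => x == counts.getD 0 0)

-- ===== PRECONDITION & SPEC =====
-- A indexes t[p][r'][c'] with r', c' < N = len(t); Pre_ admits every t whose levels all
-- have at least N rows of length at least N (rows may be longer), plus every t with
-- N ≤ 1, where A touches no cell; outside this A raises IndexError on some cell, except
-- that on a table whose counts already differ before a malformed level A returns False
-- via its early return while B, which also scans the later levels, raises there.
def Pre_ex12 (t : List (List (List Int))) : Prop :=
  (∀ lvl ∈ t, t.length ≤ lvl.length ∧ ∀ row ∈ lvl, t.length ≤ row.length) ∨ t.length ≤ 1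
instance (t : List (List (List Int))) : Decidable (Pre_ex12 t) := by unfold Pre_ex12; infer_instance
def pvWitness_ex12 : List (List (List Int)) :=
  [[[4, 5], [6, 7]], [[8, 9], [10, 11]]]
def Spec_ex12 (t : List (List (List Int))) (out : Bool) : Prop := out = ex12_alt t
instance (t : List (List (List Int))) (out : Bool) : Decidable (Spec_ex12 t out) := by unfold Spec_ex12; infer_instance

-- ===== CLAIM (what is proved, stated in full; the proofs are below) =====
def Claim_equal_ex12 : Prop := ∀ (t : List (List (List Int))), Dom_ex12 t → Pre_ex12 t → Spec_ex12 t (ex12 t)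

-- ===== LEMMAS AND PROOFS =====

-- ifComplex only returns 0 or 1
theorem ifComplexAux01 (n : Int) : ∀ (fuel : Nat) (i : Int), ifComplexAux n fuel i = 0 ∨ ifComplexAux n fuel i = 1 := by
  intro fuel
  induction fuel with
  | zero => intro i; left; rfl
  | succ k ih =>
    intro i
    simp only [ifComplexAux]
    split_ifs <;> simp [ih]

theorem ifComplex01 (n : Int) : ifComplex n = 0 ∨ ifComplex n = 1 := by
  unfold ifComplex
  split_ifs <;> simp [ifComplexAux01]

theorem getD_map_lt {α β : Type} (f : α → β) (l : List α) (i : Nat) (d : β) (d0 : α) (h : i < l.length) :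
    (l.map f).getD i d = f (l.getD i d0) := by
  rw [List.getD_eq_getElem?_getD, List.getD_eq_getElem?_getD, List.getElem?_map,
    List.getElem?_eq_getElem h]
  rfl

-- the canonical per-cell condition: the cell is interior and all six neighbours composite
def goodB (lvl : List (List Int)) (N : Nat) (r c : Nat) : Bool :=
  decide (0 < r ∧ r < N-1 ∧ 0 < c ∧ c < N-1)
  && (ifComplex ((lvl.getD (r-1) []).getD c 0) == 1)
  && (ifComplex ((lvl.getD (r+1) []).getD c 0) == 1)
  && (ifComplex ((lvl.getD (r-1) []).getD (c-1) 0) == 1)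
  && (ifComplex ((lvl.getD (r+1) []).getD (c-1) 0) == 1)
  && (ifComplex ((lvl.getD (r-1) []).getD (c+1) 0) == 1)
  && (ifComplex ((lvl.getD (r+1) []).getD (c+1) 0) == 1)

theorem six_char (i1 i2 i3 i4 i5 i6 : Int)
    (h1 : i1 = 0 ∨ i1 = 1) (h2 : i2 = 0 ∨ i2 = 1) (h3 : i3 = 0 ∨ i3 = 1)
    (h4 : i4 = 0 ∨ i4 = 1) (h5 : i5 = 0 ∨ i5 = 1) (h6 : i6 = 0 ∨ i6 = 1) :
    decide (i1 + i2 + i3 + i4 + i5 + i6 ≥ 6)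
    = ((i1 == 1) && (i2 == 1) && (i3 == 1) && (i4 == 1) && (i5 == 1) && (i6 == 1)) := by
  rcases h1 with rfl | rfl <;> rcases h2 with rfl | rfl <;> rcases h3 with rfl | rfl <;>
    rcases h4 with rfl | rfl <;> rcases h5 with rfl | rfl <;> rcases h6 with rfl | rfl <;> decide

theorem iteIC_le_one (P : Prop) [Decidable P] (x : Int) :
    0 ≤ (if P then ifComplex x else 0) ∧ (if P then ifComplex x else 0) ≤ 1 := by
  split
  · rcases ifComplex01 x with h | h <;> rw [h] <;> omega
  · omega

-- A-side per-cell characterisation: cnt >= 6 iff goodB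
theorem cell_char (lvl : List (List Int)) (N r c : Nat) :
    decide (cntA lvl N r c ≥ 6) = goodB lvl N r c := by
  by_cases hI : 0 < r ∧ r < N-1 ∧ 0 < c ∧ c < N-1
  · obtain ⟨h1, h2, h3, h4⟩ := hI
    unfold cntA goodB
    rw [if_pos (show r > 0 from h1), if_pos h2, if_pos ⟨h3, h1⟩, if_pos ⟨h3, h2⟩,
      if_pos ⟨h4, h1⟩, if_pos ⟨h4, h2⟩,
      decide_eq_true (show 0 < r ∧ r < N-1 ∧ 0 < c ∧ c < N-1 from ⟨h1, h2, h3, h4⟩),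
      Bool.true_and]
    exact six_char _ _ _ _ _ _ (ifComplex01 _) (ifComplex01 _) (ifComplex01 _)
      (ifComplex01 _) (ifComplex01 _) (ifComplex01 _)
  · rw [goodB, decide_eq_false hI]
    simp only [Bool.false_and]
    apply decide_eq_false
    intro hge
    unfold cntA at hge
    have b1 := iteIC_le_one (r > 0) ((lvl.getD (r-1) []).getD c 0)
    have b2 := iteIC_le_one (r < N-1) ((lvl.getD (r+1) []).getD c 0)
    have b3 := iteIC_le_one (c > 0 ∧ r > 0) ((lvl.getD (r-1) []).getD (c-1) 0)
    have b4 := iteIC_le_one (c > 0 ∧ r < N-1) ((lvl.getD (r+1) []).getD (c-1) 0)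
    have b5 := iteIC_le_one (c < N-1 ∧ r > 0) ((lvl.getD (r-1) []).getD (c+1) 0)
    have b6 := iteIC_le_one (c < N-1 ∧ r < N-1) ((lvl.getD (r+1) []).getD (c+1) 0)
    by_cases g1 : 0 < r
    · by_cases g2 : r < N-1
      · by_cases g3 : 0 < c
        · by_cases g4 : c < N-1
          · exact hI ⟨g1, g2, g3, g4⟩
          · have z1 : (if c < N-1 ∧ r > 0 then ifComplex ((lvl.getD (r-1) []).getD (c+1) 0) else 0) = 0 :=
              if_neg (by tauto)
            have z2 : (if c < N-1 ∧ r < N-1 then ifComplex ((lvl.getD (r+1) []).getD (c+1) 0) else 0) = 0 :=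
              if_neg (by tauto)
            linarith [b1.2, b2.2, b3.2, b4.2, z1, z2]
        · have z1 : (if c > 0 ∧ r > 0 then ifComplex ((lvl.getD (r-1) []).getD (c-1) 0) else 0) = 0 :=
            if_neg (by tauto)
          have z2 : (if c > 0 ∧ r < N-1 then ifComplex ((lvl.getD (r+1) []).getD (c-1) 0) else 0) = 0 :=
            if_neg (by tauto)
          linarith [b1.2, b2.2, b5.2, b6.2, z1, z2]
      · have z1 : (if r < N-1 then ifComplex ((lvl.getD (r+1) []).getD c 0) else 0) = 0 :=
          if_neg g2
        have z2 : (if c > 0 ∧ r < N-1 then ifComplex ((lvl.getD (r+1) []).getD (c-1) 0) else 0) = 0 :=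
          if_neg (by tauto)
        have z3 : (if c < N-1 ∧ r < N-1 then ifComplex ((lvl.getD (r+1) []).getD (c+1) 0) else 0) = 0 :=
          if_neg (by tauto)
        linarith [b1.2, b3.2, b5.2, z1, z2, z3]
    · have z1 : (if r > 0 then ifComplex ((lvl.getD (r-1) []).getD c 0) else 0) = 0 :=
        if_neg g1
      have z2 : (if c > 0 ∧ r > 0 then ifComplex ((lvl.getD (r-1) []).getD (c-1) 0) else 0) = 0 :=
        if_neg (by tauto)
      have z3 : (if c < N-1 ∧ r > 0 then ifComplex ((lvl.getD (r-1) []).getD (c+1) 0) else 0) = 0 :=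
        if_neg (by tauto)
      linarith [b2.2, b4.2, b6.2, z1, z2, z3]

theorem goodB_false (lvl : List (List Int)) (N r c : Nat)
    (h : ¬ (0 < r ∧ r < N-1 ∧ 0 < c ∧ c < N-1)) : goodB lvl N r c = false := by
  rw [goodB, decide_eq_false h]
  simp only [Bool.false_and]

-- counting folds
theorem count_foldl (p : Nat → Prop) [DecidablePred p] :
    ∀ (l : List Nat) (a : Int),
      l.foldl (fun acc x => if p x then acc + 1 else acc) a
      = a + (l.countP (fun x => decide (p x)) : Nat) := by
  intro l
  induction l with
  | nil => intro a; simp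
  | cons x xs ih =>
    intro a
    rw [List.foldl_cons, ih, List.countP_cons]
    by_cases h : p x
    · rw [if_pos h, decide_eq_true h, if_pos rfl]
      push_cast
      ring
    · rw [if_neg h, decide_eq_false h]
      simp

theorem foldl_add_sum (g : Nat → Int) : ∀ (l : List Nat) (a : Int),
    l.foldl (fun acc r => acc + g r) a = a + (l.map g).sum := by
  intro l
  induction l with
  | nil => intro a; simp
  | cons x xs ih => intro a; simp only [List.foldl, List.map, List.sum_cons]; rw [ih]; ring

-- a double counting fold equals the sum of the per-row counts
theorem cnt2_eq_sum (p : Nat → Nat → Prop) [∀ r, DecidablePred (p r)] (Lr Lc : List Nat) (a : Int) :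
    Lr.foldl (fun acc r => Lc.foldl (fun acc c => if p r c then acc + 1 else acc) acc) a
    = a + (Lr.map (fun r => ((Lc.countP (fun c => decide (p r c)) : Nat) : Int))).sum := by
  have hbody : (fun (acc : Int) r => Lc.foldl (fun acc c => if p r c then acc + 1 else acc) acc)
      = fun acc r => acc + ((Lc.countP (fun c => decide (p r c)) : Nat) : Int) := by
    funext acc r
    exact count_foldl (p r) Lc acc
  rw [hbody, foldl_add_sum]

-- ex12Level as a sum of per-row goodB-counts over the full ranges
theorem levelA_eq (lvl : List (List Int)) (N : Nat) (acc : Int) :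
    ex12Level lvl N acc
    = acc + ((List.range N).map (fun r => (((List.range N).countP (goodB lvl N r) : Nat) : Int))).sum := by
  unfold ex12Level
  rw [cnt2_eq_sum (fun r c => cntA lvl N r c ≥ 6)]
  congr 1
  apply congrArg
  apply List.map_congr_left
  intro r _
  congr 1
  apply List.countP_congr
  intro c _
  rw [cell_char lvl N r c]

-- boundary rows/columns contribute nothing
theorem range_split (m : Nat) : List.range (m+2) = [0] ++ List.range' 1 m ++ [m+1] := by
  rw [List.range_succ, List.range_eq_range', List.range'_succ]
  simp

theorem countP_range_inner (lvl : List (List Int)) (N r : Nat) (hN : 2 ≤ N) :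
    (List.range N).countP (goodB lvl N r) = (List.range' 1 (N-2)).countP (goodB lvl N r) := by
  obtain ⟨m, rfl⟩ : ∃ m, N = m + 2 := ⟨N - 2, by omega⟩
  have e2 : m + 2 - 2 = m := by omega
  rw [e2, range_split, List.countP_append, List.countP_append]
  have hz0 : List.countP (goodB lvl (m+2) r) [0] = 0 := by
    simp [goodB_false lvl (m+2) r 0 (by omega)]
  have hz1 : List.countP (goodB lvl (m+2) r) [m+1] = 0 := by
    simp [goodB_false lvl (m+2) r (m+1) (by omega)]
  rw [hz0, hz1]
  omega

theorem row_zero (lvl : List (List Int)) (N r : Nat) (Lc : List Nat)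
    (hr : ¬ (0 < r ∧ r < N-1)) : Lc.countP (goodB lvl N r) = 0 := by
  rw [List.countP_eq_zero]
  intro c _
  simp [goodB_false lvl N r c (by tauto)]

-- the restricted double sum (what B counts), still phrased through goodB
theorem sumA_restrict (lvl : List (List Int)) (N : Nat) :
    ((List.range N).map (fun r => (((List.range N).countP (goodB lvl N r) : Nat) : Int))).sum
    = ((List.range' 1 (N-2)).map (fun r => (((List.range' 1 (N-2)).countP (goodB lvl N r) : Nat) : Int))).sum := by
  by_cases hN : 2 ≤ N
  · obtain ⟨m, rfl⟩ : ∃ m, N = m + 2 := ⟨N - 2, by omega⟩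
    have e2 : m + 2 - 2 = m := by omega
    rw [e2]
    have hmid : ((List.range (m+2)).map (fun r => (((List.range (m+2)).countP (goodB lvl (m+2) r) : Nat) : Int))).sum
        = ((List.range (m+2)).map (fun r => (((List.range' 1 m).countP (goodB lvl (m+2) r) : Nat) : Int))).sum := by
      apply congrArg
      apply List.map_congr_left
      intro r _
      have := countP_range_inner lvl (m+2) r hN
      rw [show m + 2 - 2 = m from by omega] at this
      rw [this]
    rw [hmid, range_split]
    simp only [List.map_append, List.sum_append]
    have hz0 : (([0] : List Nat).map (fun r => (((List.range' 1 m).countP (goodB lvl (m+2) r) : Nat) : Int))).sum = 0 := by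
      simp [row_zero lvl (m+2) 0 (List.range' 1 m) (by omega)]
    have hz1 : (([m+1] : List Nat).map (fun r => (((List.range' 1 m).countP (goodB lvl (m+2) r) : Nat) : Int))).sum = 0 := by
      simp [row_zero lvl (m+2) (m+1) (List.range' 1 m) (by omega)]
    rw [hz0, hz1]
    ring
  · -- N ≤ 1: every row count is 0 and the restricted range is empty
    have h1 : ((List.range N).map (fun r => (((List.range N).countP (goodB lvl N r) : Nat) : Int))).sum = 0 := by
      rw [List.sum_eq_zero]
      intro x hx
      obtain ⟨r, hr, rfl⟩ := List.mem_map.mp hx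
      rw [row_zero lvl N r (List.range N) (by omega)]
      rfl
    have h2 : List.range' 1 (N-2) = [] := by
      have : N - 2 = 0 := by omega
      rw [this, List.range'_zero]
    rw [h1, h2]
    rfl

theorem decide_bool (b : Bool) : decide (b = true) = b := by cases b <;> rfl

-- evaluating one win-table read inside the shape hypotheses
theorem win_read (lvl : List (List Int)) (N : Nat) (h1 : N ≤ lvl.length)
    (h2 : ∀ row ∈ lvl, N ≤ row.length) (r' c : Nat) (hr' : r' < N) (hc1 : 1 ≤ c) (hc2 : c ≤ N-2) :
    (((List.range N).map (fun r => (List.range N).map (fun c =>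
      decide (1 ≤ c ∧ c ≤ N - 2)
        && ((lvl.map (fun row => row.map (fun x => ifComplex x == 1))).getD r []).getD (c - 1) false
        && ((lvl.map (fun row => row.map (fun x => ifComplex x == 1))).getD r []).getD c false
        && ((lvl.map (fun row => row.map (fun x => ifComplex x == 1))).getD r []).getD (c + 1) false))).getD r' []).getD c false
    = ((ifComplex ((lvl.getD r' []).getD (c-1) 0) == 1)
        && (ifComplex ((lvl.getD r' []).getD c 0) == 1)
        && (ifComplex ((lvl.getD r' []).getD (c+1) 0) == 1)) := by
  have hc : c < N := by omega
  have hrg : r' < (List.range N).length := by simpa using hr'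
  have hcg : c < (List.range N).length := by simpa using hc
  rw [getD_map_lt _ (List.range N) r' [] 0 hrg, getD_map_lt _ (List.range N) c false 0 hcg]
  have her : (List.range N).getD r' 0 = r' := by
    rw [List.getD_eq_getElem?_getD, List.getElem?_range hr']; rfl
  have hec : (List.range N).getD c 0 = c := by
    rw [List.getD_eq_getElem?_getD, List.getElem?_range hc]; rfl
  rw [her, hec, decide_eq_true ⟨hc1, hc2⟩, Bool.true_and]
  have hrl : r' < lvl.length := by omega
  have hrow : lvl.getD r' [] ∈ lvl := by
    rw [List.getD_eq_getElem?_getD, List.getElem?_eq_getElem hrl]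
    exact List.getElem_mem hrl
  have hlen : N ≤ (lvl.getD r' []).length := h2 _ hrow
  rw [getD_map_lt _ lvl r' [] [] hrl,
    getD_map_lt _ _ (c-1) false 0 (by omega),
    getD_map_lt _ _ c false 0 (by omega),
    getD_map_lt _ _ (c+1) false 0 (by omega)]

theorem bool6 (a b c d e f : Bool) :
    (((a && b) && c) && ((d && e) && f)) = (b && e && a && d && c && f) := by
  cases a <;> cases b <;> cases c <;> cases d <;> cases e <;> cases f <;> rfl

-- B-side per-cell: the two window bits equal goodB on the restricted ranges
theorem bcell (lvl : List (List Int)) (N : Nat) (h1 : N ≤ lvl.length)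
    (h2 : ∀ row ∈ lvl, N ≤ row.length) (r c : Nat)
    (hr1 : 1 ≤ r) (hr2 : r ≤ N-2) (hc1 : 1 ≤ c) (hc2 : c ≤ N-2) :
    (((((List.range N).map (fun r => (List.range N).map (fun c =>
      decide (1 ≤ c ∧ c ≤ N - 2)
        && ((lvl.map (fun row => row.map (fun x => ifComplex x == 1))).getD r []).getD (c - 1) false
        && ((lvl.map (fun row => row.map (fun x => ifComplex x == 1))).getD r []).getD c false
        && ((lvl.map (fun row => row.map (fun x => ifComplex x == 1))).getD r []).getD (c + 1) false))).getD (r-1) []).getD c false)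
    && ((((List.range N).map (fun r => (List.range N).map (fun c =>
      decide (1 ≤ c ∧ c ≤ N - 2)
        && ((lvl.map (fun row => row.map (fun x => ifComplex x == 1))).getD r []).getD (c - 1) false
        && ((lvl.map (fun row => row.map (fun x => ifComplex x == 1))).getD r []).getD c false
        && ((lvl.map (fun row => row.map (fun x => ifComplex x == 1))).getD r []).getD (c + 1) false))).getD (r+1) []).getD c false))
    = goodB lvl N r c := by
  rw [win_read lvl N h1 h2 (r-1) c (by omega) hc1 hc2,
    win_read lvl N h1 h2 (r+1) c (by omega) hc1 hc2]
  rw [goodB, decide_eq_true (show 0 < r ∧ r < N-1 ∧ 0 < c ∧ c < N-1 by omega), Bool.true_and]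
  exact bool6 _ _ _ _ _ _

-- B's per-level count equals the restricted goodB double count
theorem levelB_eq (lvl : List (List Int)) (N : Nat) (h1 : N ≤ lvl.length)
    (h2 : ∀ row ∈ lvl, N ≤ row.length) :
    ex12AltLevel N lvl
    = ((List.range' 1 (N-2)).map (fun r => (((List.range' 1 (N-2)).countP (goodB lvl N r) : Nat) : Int))).sum := by
  unfold ex12AltLevel
  have hn : N - 1 - 1 = N - 2 := by omega
  rw [hn]
  rw [cnt2_eq_sum (fun r c => _ = true)]
  rw [zero_add]
  apply congrArg
  apply List.map_congr_left
  intro r hr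
  have hrm := List.mem_range'.mp hr
  congr 1
  apply List.countP_congr
  intro c hc
  have hcm := List.mem_range'.mp hc
  rw [decide_bool]
  rw [bcell lvl N h1 h2 r c (by omega) (by omega) (by omega) (by omega)]

-- the per-level equality used by the outer loop
theorem level_eq (lvl : List (List Int)) (N : Nat) (h1 : N ≤ lvl.length)
    (h2 : ∀ row ∈ lvl, N ≤ row.length) (acc : Int) :
    ex12Level lvl N acc = acc + ex12AltLevel N lvl := by
  rw [levelA_eq, sumA_restrict, levelB_eq lvl N h1 h2]

-- A's per-level counts, in order
def countsA (t : List (List (List Int))) : List Int :=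
  t.map (fun lvl => ex12Level lvl t.length 0)

theorem getD_take_append (counts rest : List Int) (m i : Nat) (him : i < m)
    (hm : m ≤ counts.length) : ((counts.take m) ++ rest).getD i 0 = counts.getD i 0 := by
  rw [List.getD_append _ _ _ i (by rw [List.length_take]; omega)]
  rw [List.getD_eq_getElem?_getD, List.getD_eq_getElem?_getD, List.getElem?_take]
  simp [him]

-- the outer p-loop computes the adjacent-equality chain over countsA
theorem chain_go (t : List (List (List Int))) :
    ∀ (k a : Nat), a + k = t.length →
      ex12Go t t.length (List.range' a k) ((countsA t).take a ++ List.replicate k 0)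
      = decide (∀ p : Nat, a ≤ p → p < t.length → p ≠ 0 →
          (countsA t).getD p 0 = (countsA t).getD (p-1) 0) := by
  intro k
  induction k with
  | zero =>
    intro a ha
    have hvac : ∀ p : Nat, a ≤ p → p < t.length → p ≠ 0 →
        (countsA t).getD p 0 = (countsA t).getD (p-1) 0 := by
      intro p h1 h2 h3; omega
    rw [List.range'_zero, decide_eq_true hvac]
    rfl
  | succ k ih =>
    intro a ha
    have hlen : (countsA t).length = t.length := by simp [countsA]
    have haN : a < t.length := by omega
    rw [List.range'_succ]
    simp only [ex12Go]
    have hga : (((countsA t).take a ++ List.replicate (k+1) 0)).getD a 0 = 0 := by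
      rw [List.getD_append_right _ _ _ a (by rw [List.length_take]; omega)]
      have hz : a - (List.take a (countsA t)).length = 0 := by rw [List.length_take]; omega
      rw [hz]
      simp
    have hlvl : ex12Level (t.getD a []) t.length ((((countsA t).take a ++ List.replicate (k+1) 0)).getD a 0)
        = (countsA t).getD a 0 := by
      rw [hga, countsA, getD_map_lt _ t a 0 [] haN]
    have hai : a < (countsA t).length := by omega
    have hgd : (countsA t).getD a 0 = (countsA t)[a] := by
      rw [List.getD_eq_getElem?_getD, List.getElem?_eq_getElem hai]; rfl
    have htk : (countsA t).take (a+1) = (countsA t).take a ++ [(countsA t)[a]] := by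
      rw [List.take_add_one, List.getElem?_eq_getElem hai]; rfl
    have hset : (((countsA t).take a ++ List.replicate (k+1) 0)).set a ((countsA t).getD a 0)
        = (countsA t).take (a+1) ++ List.replicate k 0 := by
      rw [List.set_append]
      rw [if_neg (by rw [List.length_take]; omega)]
      have hz : a - (List.take a (countsA t)).length = 0 := by rw [List.length_take]; omega
      rw [hz, List.replicate_succ, List.set_cons_zero, htk, hgd, List.append_assoc]
      rfl
    rw [hlvl, hset]
    have hga' : ((countsA t).take (a+1) ++ List.replicate k 0).getD a 0 = (countsA t).getD a 0 :=
      getD_take_append _ _ _ _ (by omega) (by omega)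
    have hga'' : ((countsA t).take (a+1) ++ List.replicate k 0).getD (a-1) 0 = (countsA t).getD (a-1) 0 :=
      getD_take_append _ _ _ _ (by omega) (by omega)
    rw [hga', hga'']
    by_cases hcond : a ≠ 0 ∧ (countsA t).getD a 0 ≠ (countsA t).getD (a-1) 0
    · rw [if_pos hcond]
      symm
      simp only [decide_eq_false_iff_not]
      intro hall
      exact hcond.2 (hall a (le_refl a) haN hcond.1)
    · rw [if_neg hcond]
      rw [ih (a+1) (by omega)]
      apply decide_eq_decide.mpr
      constructor
      · intro h p hp1 hp2 hp3
        rcases Nat.eq_or_lt_of_le hp1 with heq | hlt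
        · subst heq
          by_contra hne
          exact hcond ⟨hp3, hne⟩
        · exact h p hlt hp2 hp3
      · intro h p hp1 hp2 hp3
        exact h p (by omega) hp2 hp3

-- adjacent-equality chain iff everything equals the head
theorem chain_iff (c : Nat → Int) (N : Nat) :
    (∀ p, p < N → p ≠ 0 → c p = c (p-1)) ↔ (∀ p, p < N → c p = c 0) := by
  constructor
  · intro h p
    induction p with
    | zero => intro _; rfl
    | succ q ihq =>
      intro hq
      have h1 : c (q+1) = c q := by simpa using h (q+1) hq (Nat.succ_ne_zero q)
      rw [h1, ihq (by omega)]
  · intro h p hp hp0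
    rw [h p hp, h (p-1) (by omega)]

-- B's result as a decide over its counts list
theorem alt_decide (t : List (List (List Int))) :
    ex12_alt t = decide (∀ p : Nat, p < t.length →
      (t.map (ex12AltLevel t.length)).getD p 0 = (t.map (ex12AltLevel t.length)).getD 0 0) := by
  unfold ex12_alt
  rw [Bool.eq_iff_iff]
  simp only [List.all_eq_true, decide_eq_true_eq, beq_iff_eq]
  constructor
  · intro h p hp
    have hp' : p < (t.map (ex12AltLevel t.length)).length := by simpa using hp
    have := h ((t.map (ex12AltLevel t.length))[p]) (List.getElem_mem hp')
    rw [List.getD_eq_getElem?_getD, List.getElem?_eq_getElem hp']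
    exact this
  · intro h x hx
    obtain ⟨i, hi, rfl⟩ := List.mem_iff_getElem.mp hx
    have := h i (by simpa using hi)
    rw [List.getD_eq_getElem?_getD, List.getElem?_eq_getElem hi] at this
    exact this

-- ===== VERDICT (by name: the statement is the Claim_ definition above) =====
theorem ex12_spec : Claim_equal_ex12 := by
  intro t _ hpre
  unfold Spec_ex12
  rcases hpre with hcube | hsmall
  · -- counts agree level by level
    have hcounts : countsA t = t.map (ex12AltLevel t.length) := by
      unfold countsA
      apply List.map_congr_left
      intro lvl hm
      rw [level_eq lvl t.length (hcube lvl hm).1 (hcube lvl hm).2]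
      ring
    have hA : ex12 t = decide (∀ p : Nat, 0 ≤ p → p < t.length → p ≠ 0 →
        (countsA t).getD p 0 = (countsA t).getD (p-1) 0) := by
      show ex12Go t t.length (List.range t.length) (List.replicate t.length 0) = _
      rw [List.range_eq_range']
      have h0 := chain_go t t.length 0 (by omega)
      simp only [List.take_zero, List.nil_append] at h0
      rw [h0]
    rw [hA, alt_decide, ← hcounts]
    apply decide_eq_decide.mpr
    constructor
    · intro h
      exact (chain_iff (fun p => (countsA t).getD p 0) t.length).mp (fun p hp hp0 => h p (by omega) hp hp0)
    · intro h p _ hp hp0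
      exact (chain_iff (fun p => (countsA t).getD p 0) t.length).mpr h p hp hp0
  · -- N ≤ 1: A touches no neighbour and both sides are true
    match t, hsmall with
    | [], _ => rfl
    | [lvl], _ =>
      show ex12 [lvl] = ex12_alt [lvl]
      rw [show ex12 [lvl] = true by simp [ex12, List.range_succ, ex12Go, ex12Level]]
      rw [alt_decide]
      symm
      simp only [decide_eq_true_eq]
      intro p hp
      have hp0 : p = 0 := by omega
      subst hp0
      rfl
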